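-- pv_equiv track=rewrite | github.com/eloyekunle/python_snippets | others/first_occurence_of_largest_number.py | first_occurence
-- ===== SOURCE A (Python) =====
-- def first_occurence(numbers):
--     largest = numbers[0]
--     index = 0
--     length = len(numbers)
--     for i in range(1, length):
--         if numbers[i] > largest:
--             largest = numbers[i]
--             index = i
--     return largest, index
-- ===== SOURCE B (Python) =====
-- def first_occurence(numbers):
--     largest = max(numbers)
--     return largest, numbers.index(largest)
-- ===== Notes on version B (the rewrite author's own statement) =====
-- stated objective: idiomatic
-- what changed: Replaced the single index-tracking scan with the standard two-pass idiom: max() to get the largest value, then list.index() to get its first position.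
-- outside the precondition, e.g. on first_occurence([]): A raises IndexError, B raises ValueError
import Mathlib
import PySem

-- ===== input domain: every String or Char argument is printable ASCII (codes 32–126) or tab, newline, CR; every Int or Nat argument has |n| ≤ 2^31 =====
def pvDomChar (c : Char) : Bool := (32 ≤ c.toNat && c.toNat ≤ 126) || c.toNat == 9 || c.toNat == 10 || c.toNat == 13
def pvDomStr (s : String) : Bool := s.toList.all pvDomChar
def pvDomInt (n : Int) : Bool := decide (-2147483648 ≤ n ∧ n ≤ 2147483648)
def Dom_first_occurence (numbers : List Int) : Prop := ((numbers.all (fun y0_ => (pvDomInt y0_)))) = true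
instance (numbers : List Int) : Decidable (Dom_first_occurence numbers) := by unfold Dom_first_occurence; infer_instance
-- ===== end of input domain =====

-- B replaces A's single index-tracking scan by the idiomatic two-pass max()+list.index(); same O(n) cost.


-- ===== PORT A =====
def first_occurence (numbers : List Int) : Int × Int :=
  let largest := PySem.List.pyGetD numbers 0 0   -- numbers[0]; [] raises IndexError, excluded by Pre_
  let length : Int := numbers.length
  (PySem.List.pyRange 1 length).foldl
    (fun s i =>
      if PySem.List.pyGetD numbers i 0 > s.1 then (PySem.List.pyGetD numbers i 0, i) else s)
    (largest, 0)

-- ===== PORT B =====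
def first_occurence_alt (numbers : List Int) : Int × Int :=
  let largest := (PySem.List.max? numbers (fun y => y)).getD 0   -- max([]) raises ValueError, excluded by Pre_
  (largest, (((PySem.List.index? numbers largest).getD 0 : Nat) : Int))

-- ===== PRECONDITION & SPEC =====
-- On the empty list both A (numbers[0] → IndexError) and B (max([]) → ValueError) raise; nothing else raises.
def Pre_first_occurence (numbers : List Int) : Prop := numbers ≠ []
instance (numbers : List Int) : Decidable (Pre_first_occurence numbers) := by unfold Pre_first_occurence; infer_instance
def pvWitness_first_occurence : List Int := ([3, 1, 3, 2])

def Spec_first_occurence (numbers : List Int) (out : Int × Int) : Prop := out = first_occurence_alt numbers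
instance (numbers : List Int) (out : Int × Int) : Decidable (Spec_first_occurence numbers out) := by unfold Spec_first_occurence; infer_instance

-- ===== CLAIM (what is proved, stated in full; the proofs are below) =====
def Claim_equal_first_occurence : Prop := ∀ (numbers : List Int), Dom_first_occurence numbers → Pre_first_occurence numbers → Spec_first_occurence numbers (first_occurence numbers)

-- ===== LEMMAS AND PROOFS =====

-- structural form of A's loop: running (largest, index) over the remaining suffix, i the index of the head
def pvGo (largest idx i : Int) : List Int → Int × Int
  | [] => (largest, idx)
  | v :: rest => if v > largest then pvGo v i (i + 1) rest else pvGo largest idx (i + 1) rest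

-- A's pyRange fold over indices equals pvGo on the corresponding suffix
lemma pvA_fold (ys : List Int) : ∀ (full : List Int) (a : Nat) (l idx : Int),
    full.drop a = ys →
    (PySem.List.pyRange (a : Int) (full.length : Int)).foldl
      (fun s i => if PySem.List.pyGetD full i 0 > s.1 then (PySem.List.pyGetD full i 0, i) else s)
      (l, idx)
    = pvGo l idx (a : Int) ys := by
  induction ys with
  | nil =>
    intro full a l idx h
    have hlen : (full.length : Int) ≤ (a : Int) := by
      have := List.drop_eq_nil_iff.mp h
      exact_mod_cast this
    rw [PySem.List.pyRange_one_eq_nil hlen]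
    rfl
  | cons v rest ih =>
    intro full a l idx h
    have hlt : a < full.length := by
      by_contra hc
      have : full.drop a = [] := List.drop_eq_nil_iff.mpr (by omega)
      rw [this] at h; exact (List.cons_ne_nil _ _) h.symm
    have hget : full.getD a 0 = v := by
      have h0 : (full.drop a)[0]? = some v := by rw [h]; rfl
      rw [List.getElem?_drop] at h0
      simp only [Nat.add_zero] at h0
      simp [List.getD, h0]
    have hdrop : full.drop (a + 1) = rest := by
      have h1 : (full.drop a).drop 1 = rest := by rw [h]; rfl
      rw [List.drop_drop] at h1
      simpa [Nat.add_comm] using h1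
    have hlt' : (a : Int) < (full.length : Int) := by exact_mod_cast hlt
    rw [PySem.List.pyRange_one_cons hlt']
    simp only [List.foldl_cons]
    rw [PySem.List.pyGetD_natCast, hget]
    by_cases hv : v > l
    · rw [if_pos hv]
      have ihv := ih full (a + 1) v (a : Int) hdrop
      push_cast at ihv ⊢
      simp only [pvGo, if_pos hv]
      exact ihv
    · rw [if_neg hv]
      have ihv := ih full (a + 1) l idx hdrop
      push_cast at ihv ⊢
      simp only [pvGo, if_neg hv]
      exact ihv

-- the first component of pvGo is the running max
lemma pvGo_fst (ys : List Int) : ∀ (l idx i : Int), (pvGo l idx i ys).1 = ys.foldl max l := by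
  induction ys with
  | nil => intro l idx i; rfl
  | cons v rest ih =>
    intro l idx i
    by_cases hv : v > l
    · simp [pvGo, hv, ih, max_eq_right (le_of_lt hv)]
    · simp [pvGo, hv, ih, max_eq_left (by omega : v ≤ l)]

-- if nothing in ys beats l, the state never changes
lemma pvGo_const (ys : List Int) : ∀ (l idx i : Int), (∀ y ∈ ys, y ≤ l) → pvGo l idx i ys = (l, idx) := by
  induction ys with
  | nil => intro l idx i _; rfl
  | cons v rest ih =>
    intro l idx i h
    have hv : ¬ v > l := by have := h v (by simp); omega
    simp only [pvGo, if_neg hv]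
    exact ih l idx (i + 1) (fun y hy => h y (by simp [hy]))

-- if ys does beat l, the final index is i + the first position of the max of ys
lemma pvGo_snd (ys : List Int) : ∀ (l idx i : Int), l < ys.foldl max l →
    (pvGo l idx i ys).2 = i + (ys.idxOf (ys.foldl max l) : Int) := by
  induction ys with
  | nil => intro l idx i h; simp at h
  | cons v rest ih =>
    intro l idx i h
    simp only [List.foldl_cons] at h ⊢
    by_cases hv : v > l
    · rw [max_eq_right (le_of_lt hv)] at h ⊢
      simp only [pvGo, if_pos hv]
      by_cases hm : v < rest.foldl max v
      · rw [ih v i (i + 1) hm]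
        have hne : v ≠ rest.foldl max v := by omega
        rw [List.idxOf_cons_ne rest hne]
        push_cast; ring
      · have hle : rest.foldl max v ≤ v := by omega
        have heq : rest.foldl max v = v := le_antisymm hle (PySem.List.le_foldl_max rest v).1
        have hall : ∀ y ∈ rest, y ≤ v := by
          intro y hy
          have := (PySem.List.le_foldl_max rest v).2 y hy
          omega
        rw [pvGo_const rest v i (i + 1) hall, heq]
        simp [List.idxOf_cons_eq rest rfl]
    · have hvl : v ≤ l := by omega
      rw [max_eq_left hvl] at h ⊢
      simp only [pvGo, if_neg hv]
      rw [ih l idx (i + 1) h]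
      have hne : v ≠ rest.foldl max l := by
        have := (PySem.List.le_foldl_max rest l).1; omega
      rw [List.idxOf_cons_ne rest hne]
      push_cast; ring

lemma pv_idxOf?_of_mem (l : List Int) (v : Int) (h : v ∈ l) :
    List.idxOf? v l = some (l.idxOf v) := by
  induction l with
  | nil => simp at h
  | cons x xs ih =>
    by_cases hx : x = v
    · simp [List.idxOf?_cons, hx]
    · have hv : v ∈ xs := by
        rcases List.mem_cons.mp h with h' | h'
        · exact absurd h'.symm hx
        · exact h'
      simp [List.idxOf?_cons, List.idxOf_cons_ne xs hx, hx, ih hv]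

-- ===== VERDICT (by name: the statement is the Claim_ definition above) =====
theorem first_occurence_spec : Claim_equal_first_occurence := by
  intro numbers _ hpre
  unfold Spec_first_occurence
  obtain ⟨x, t, rfl⟩ := List.exists_cons_of_ne_nil hpre
  unfold first_occurence first_occurence_alt
  simp only [PySem.List.max?_id_cons, Option.getD_some, PySem.List.index?_eq_idxOf?]
  have hA : (PySem.List.pyRange ((1 : Nat) : Int) ((x :: t).length : Int)).foldl
      (fun s i => if PySem.List.pyGetD (x :: t) i 0 > s.1 then (PySem.List.pyGetD (x :: t) i 0, i) else s)
      (x, 0) = pvGo x 0 ((1 : Nat) : Int) t :=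
    pvA_fold t (x :: t) 1 x 0 rfl
  have hget0 : PySem.List.pyGetD (x :: t) 0 0 = x := by
    simp [PySem.List.pyGetD]
  rw [hget0]
  have hA' : (PySem.List.pyRange (1 : Int) ((x :: t).length : Int)).foldl
      (fun s i => if PySem.List.pyGetD (x :: t) i 0 > s.1 then (PySem.List.pyGetD (x :: t) i 0, i) else s)
      (x, 0) = pvGo x 0 (1 : Int) t := by
    have := hA; push_cast at this; exact this
  set m := t.foldl max x with hm
  have hmem : m ∈ x :: t := by
    exact PySem.List.max?_mem (PySem.List.max?_id_cons x t)
  rw [pv_idxOf?_of_mem _ _ hmem]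
  simp only [Option.getD_some]
  by_cases hx : x < m
  · have h1 : (pvGo x 0 (1 : Int) t).1 = m := pvGo_fst t x 0 1
    have h2 : (pvGo x 0 (1 : Int) t).2 = (1 : Int) + (t.idxOf m : Int) :=
      pvGo_snd t x 0 1 hx
    have hne : x ≠ m := by omega
    have hidx : List.idxOf m (x :: t) = List.idxOf m t + 1 :=
      List.idxOf_cons_ne t hne
    rw [hA', Prod.ext_iff]
    constructor
    · rw [h1]
    · rw [h2, hidx]; push_cast; ring
  · have hle : m ≤ x := by omega
    have heq : m = x := le_antisymm hle (PySem.List.le_foldl_max t x).1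
    have hall : ∀ y ∈ t, y ≤ x := by
      intro y hy
      have := (PySem.List.le_foldl_max t x).2 y hy
      omega
    rw [hA', pvGo_const t x 0 1 hall, heq]
    simp [List.idxOf_cons_eq t rfl]
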